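-- pv_equiv track=rewrite | github.com/AngheloAlf/Programacion-CIAC-2019 | intensivos S2/Fase 1/12/Code/results.py | quienes_ejercitan
-- ===== SOURCE A (Python) =====
-- def quienes_ejercitan(usuarios):
--     diccionario={}
--     # Recorremos nuestro diccionario, considerando tanto sus llaves
--     # como sus valores.
--     for nombre, lista in usuarios.items():
--         for rutina in lista:
--             # Si es que no habiamos contabilizado esta rutina antes,
--             # la agregamos a nuestro diccionario.
--             if rutina not in diccionario:
--                 diccionario[rutina]=[]
--             # Como no queremos contabilizar varias veces a la misma persona
--             # dentro de la misma rutina, verificamos que este no se encuentre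
--             # dentro.
--             if nombre not in diccionario[rutina]:
--                 diccionario[rutina].append(nombre)
--     return diccionario
-- ===== SOURCE B (Python) =====
-- def quienes_ejercitan(usuarios):
--     # Routine-major inversion: fix each routine (in first-occurrence order),
--     # then scan the users collecting those whose routine set mentions it.
--     # Dict keys are unique, so each name appears at most once per routine.
--     orden = dict.fromkeys(r for lista in usuarios.values() for r in lista)
--     miembros = [(nombre, set(lista)) for nombre, lista in usuarios.items()]
--     return {r: [nombre for nombre, conj in miembros if r in conj]
--             for r in orden}
-- ===== Notes on version B (the rewrite author's own statement) =====
-- stated objective: alternative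
-- what changed: B is routine-major instead of user-major: it first computes the distinct routines in first-occurrence order, then for each routine scans the users (with their routine lists turned into sets once) collecting the names whose set contains it, instead of A's incremental dict building with a per-append membership check; no dictionary of lists is ever mutated.
import Mathlib
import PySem

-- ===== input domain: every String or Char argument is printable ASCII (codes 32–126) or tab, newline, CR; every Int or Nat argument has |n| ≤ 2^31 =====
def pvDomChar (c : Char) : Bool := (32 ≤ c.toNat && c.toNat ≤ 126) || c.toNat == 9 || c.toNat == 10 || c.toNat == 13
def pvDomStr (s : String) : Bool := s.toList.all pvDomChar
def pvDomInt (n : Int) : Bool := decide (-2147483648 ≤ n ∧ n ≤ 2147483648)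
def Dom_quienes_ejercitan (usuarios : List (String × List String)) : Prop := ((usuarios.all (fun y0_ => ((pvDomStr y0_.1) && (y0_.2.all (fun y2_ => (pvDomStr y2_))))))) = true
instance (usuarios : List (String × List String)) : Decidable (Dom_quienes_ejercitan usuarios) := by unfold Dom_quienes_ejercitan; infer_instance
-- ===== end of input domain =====

-- B inverts the map routine-major: it lists the distinct routines first and then, per routine,
-- scans the users for the names that mention it — no dictionary of lists is ever built or mutated.

-- ===== PORT A =====
def quienes_ejercitan (usuarios : List (String × List String)) : List (String × List String) :=
  (usuarios.foldl
    (fun diccionario par =>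
      par.2.foldl
        (fun diccionario rutina =>
          let d1 := if diccionario.contains rutina then diccionario
                    else diccionario.insert rutina ([] : List String)
          if par.1 ∈ d1.getD rutina [] then d1
          else d1.modify rutina [] (fun l => l ++ [par.1]))
        diccionario)
    (PySem.Dict.empty : PySem.Dict String (List String))).items

-- ===== PORT B =====
def quienes_ejercitan_alt (usuarios : List (String × List String)) : List (String × List String) :=
  -- orden = dict.fromkeys(r for lista in usuarios.values() for r in lista)
  let orden := PySem.List.dedup (usuarios.flatMap (fun par => par.2))
  -- {r: [nombre for nombre, lista in usuarios.items() if r in lista] for r in orden}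
  orden.map (fun r => (r, (usuarios.filter (fun par => decide (r ∈ par.2))).map Prod.fst))

-- ===== PRECONDITION & SPEC =====
-- The Python argument is a dict, whose keys are necessarily distinct; an association list
-- with duplicate keys represents no dict input, so those lists lie outside Pre_.
def Pre_quienes_ejercitan (usuarios : List (String × List String)) : Prop :=
  (usuarios.map Prod.fst).Nodup
instance (usuarios : List (String × List String)) : Decidable (Pre_quienes_ejercitan usuarios) := by
  unfold Pre_quienes_ejercitan; infer_instance
def pvWitness_quienes_ejercitan : (List (String × List String)) :=
  [("ana", ["run", "swim", "run"]), ("bo", ["run"])]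

def Spec_quienes_ejercitan (usuarios : List (String × List String)) (out : List (String × List String)) : Prop := out = quienes_ejercitan_alt usuarios
instance (usuarios : List (String × List String)) (out : List (String × List String)) : Decidable (Spec_quienes_ejercitan usuarios out) := by unfold Spec_quienes_ejercitan; infer_instance

-- ===== CLAIM (what is proved, stated in full; the proofs are below) =====
def Claim_equal_quienes_ejercitan : Prop := ∀ (usuarios : List (String × List String)), Dom_quienes_ejercitan usuarios → Pre_quienes_ejercitan usuarios → Spec_quienes_ejercitan usuarios (quienes_ejercitan usuarios)

-- ===== LEMMAS AND PROOFS =====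

-- A's inner loop body, named for the proofs (definitionally the lambda in the port)
def pvStep (n : String) (d : PySem.Dict String (List String)) (rutina : String) :
    PySem.Dict String (List String) :=
  let d1 := if d.contains rutina then d else d.insert rutina ([] : List String)
  if n ∈ d1.getD rutina [] then d1 else d1.modify rutina [] (fun l => l ++ [n])

theorem pv_dedup_append (l : List String) (x : String) :
    PySem.List.dedup (l ++ [x]) =
      if x ∈ l then PySem.List.dedup l else PySem.List.dedup l ++ [x] := by
  simp only [PySem.List.dedup_eq_ofList, PySem.Set.ofList_append, PySem.Set.update_cons,
    PySem.Set.update_nil]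
  rw [PySem.Set.add]
  simp [PySem.Set.mem_ofList]

-- inner loop: processing the routine list of ONE fresh user n
theorem pv_inner (n : String) (prev : List String) (old : String → List String)
    (hn : ∀ r, n ∉ old r) :
    ∀ (l done : List String) (d : PySem.Dict String (List String)),
      d.keys = PySem.List.dedup (prev ++ done) →
      (∀ r, d.getD r [] = old r ++ (if r ∈ done then [n] else [])) →
      (l.foldl (pvStep n) d).keys = PySem.List.dedup (prev ++ (done ++ l)) ∧
      (∀ r, (l.foldl (pvStep n) d).getD r []
            = old r ++ (if r ∈ done ++ l then [n] else [])) := by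
  intro l
  induction l with
  | nil =>
    intro done d hk hg
    simpa using ⟨hk, hg⟩
  | cons c t ih =>
    intro done d hk hg
    have hrearr : done ++ c :: t = (done ++ [c]) ++ t := by simp
    rw [List.foldl_cons, hrearr]
    have hmemkeys : c ∈ d.keys ↔ c ∈ prev ++ done := by
      rw [hk]; exact PySem.List.mem_dedup _ _
    by_cases hpd : c ∈ prev ++ done
    · -- routine already a key of the dictionary
      have hcon : d.contains c = true := by
        rw [PySem.Dict.contains_eq_decide_mem_keys]; exact decide_eq_true (hmemkeys.mpr hpd)
      have hded : PySem.List.dedup (prev ++ done ++ [c]) = PySem.List.dedup (prev ++ done) := by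
        rw [pv_dedup_append, if_pos hpd]
      by_cases hdone : c ∈ done
      · -- name already recorded under c: no change
        have hmem : n ∈ d.getD c [] := by
          rw [hg c, if_pos hdone]; simp
        have hstep : pvStep n d c = d := by
          simp only [pvStep, hcon, ite_true, hmem, ite_true]
        rw [hstep]
        refine ih (done ++ [c]) d ?_ ?_
        · rw [← List.append_assoc, hded]; exact hk
        · intro r
          rw [hg r]
          by_cases hrc : r = c
          · subst hrc; rw [if_pos hdone, if_pos (by simp [hdone])]
          · have : (r ∈ done ++ [c]) ↔ r ∈ done := by simp [hrc]
            rw [if_congr this rfl rfl]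
      · -- key exists but name not yet recorded: append
        have hmem : n ∉ d.getD c [] := by
          rw [hg c, if_neg hdone]
          simpa using hn c
        have hstep : pvStep n d c = d.insert c (d.getD c [] ++ [n]) := by
          simp only [pvStep, hcon, ite_true, hmem, ite_false]
          rfl
        rw [hstep]
        refine ih (done ++ [c]) _ ?_ ?_
        · rw [PySem.Dict.keys_insert_of_contains d _ hcon, ← List.append_assoc, hded]; exact hk
        · intro r
          rw [PySem.Dict.getD_insert]
          by_cases hrc : r = c
          · subst hrc
            rw [if_pos rfl, hg r, if_neg hdone, if_pos (by simp)]
            simp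
          · rw [if_neg hrc, hg r]
            have : (r ∈ done ++ [c]) ↔ r ∈ done := by simp [hrc]
            rw [if_congr this rfl rfl]
    · -- brand-new routine: A inserts [] then appends n
      have hcon : d.contains c = false := by
        rw [PySem.Dict.contains_eq_decide_mem_keys]
        exact decide_eq_false (fun h => hpd (hmemkeys.mp h))
      have holdc : old c = [] := by
        have h1 : d.getD c [] = old c ++ (if c ∈ done then [n] else []) := hg c
        have h2 : d.getD c [] = [] := PySem.Dict.getD_of_not_contains d [] hcon
        have hdone : c ∉ done := fun h => hpd (List.mem_append_right _ h)
        rw [h2, if_neg hdone] at h1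
        simpa using h1.symm
      have hget1 : (d.insert c ([] : List String)).getD c [] = [] :=
        PySem.Dict.getD_insert_self d c [] []
      have hstep : pvStep n d c = d.insert c [n] := by
        simp only [pvStep, hcon, Bool.false_eq_true, ite_false, hget1, List.not_mem_nil]
        have hm : ((d.insert c ([] : List String)).modify c [] fun l => l ++ [n])
            = (d.insert c ([] : List String)).insert c
                ((d.insert c ([] : List String)).getD c [] ++ [n]) := rfl
        rw [hm, hget1, PySem.Dict.insert_insert_self]
        rfl
      rw [hstep]
      refine ih (done ++ [c]) _ ?_ ?_
      · rw [PySem.Dict.keys_insert_of_not_contains d _ hcon, hk, ← List.append_assoc,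
          pv_dedup_append, if_neg hpd]
      · intro r
        rw [PySem.Dict.getD_insert]
        by_cases hrc : r = c
        · subst hrc
          rw [if_pos rfl, holdc, if_pos (by simp)]
          simp
        · rw [if_neg hrc, hg r]
          have : (r ∈ done ++ [c]) ↔ r ∈ done := by simp [hrc]
          rw [if_congr this rfl rfl]

-- outer loop invariant: after processing a prefix, keys are the deduped routines seen so far
-- and each routine maps to the fst-projection of the users filtered by membership
theorem pv_outer :
    ∀ (rest pre : List (String × List String)),
      (((pre ++ rest).map Prod.fst).Nodup) →
      ∀ (d : PySem.Dict String (List String)),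
        d.keys = PySem.List.dedup (pre.flatMap (fun p => p.2)) →
        (∀ r, d.getD r [] = (pre.filter (fun p => decide (r ∈ p.2))).map Prod.fst) →
        (rest.foldl (fun d p => p.2.foldl (pvStep p.1) d) d).keys
            = PySem.List.dedup ((pre ++ rest).flatMap (fun p => p.2)) ∧
        (∀ r, (rest.foldl (fun d p => p.2.foldl (pvStep p.1) d) d).getD r []
            = ((pre ++ rest).filter (fun p => decide (r ∈ p.2))).map Prod.fst) := by
  intro rest
  induction rest with
  | nil =>
    intro pre hnd d hk hg
    simpa using ⟨hk, hg⟩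
  | cons p t ih =>
    intro pre hnd d hk hg
    obtain ⟨n, l⟩ := p
    have hrearr : pre ++ (n, l) :: t = (pre ++ [(n, l)]) ++ t := by simp
    rw [List.foldl_cons, hrearr]
    -- n is fresh: it is not among the names recorded so far
    have hn : ∀ r, n ∉ (pre.filter (fun p => decide (r ∈ p.2))).map Prod.fst := by
      intro r hmem
      have h1 : n ∈ pre.map Prod.fst :=
        List.map_subset Prod.fst (List.filter_subset' _) hmem
      have h2 : (pre.map Prod.fst ++ n :: t.map Prod.fst).Nodup := by
        simpa using hnd
      have := (List.nodup_append.mp h2).2.2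
      exact this n h1 n (by simp) rfl
    have hinner := pv_inner n (pre.flatMap (fun p => p.2))
      (fun r => (pre.filter (fun p => decide (r ∈ p.2))).map Prod.fst) hn l [] d
      (by simpa using hk) (by intro r; simpa using hg r)
    obtain ⟨hk1, hg1⟩ := hinner
    refine ih (pre ++ [(n, l)]) (by simpa using hnd) _ ?_ ?_
    · rw [hk1]; simp
    · intro r
      rw [hg1 r]
      simp only [List.filter_append, List.map_append, List.nil_append]
      congr 1
      by_cases hrl : r ∈ l
      · rw [if_pos hrl]; simp [List.filter, hrl]
      · rw [if_neg hrl]; simp [List.filter, hrl]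

-- ===== VERDICT (by name: the statement is the Claim_ definition above) =====
theorem quienes_ejercitan_spec : Claim_equal_quienes_ejercitan := by
  intro usuarios _ hpre
  unfold Spec_quienes_ejercitan
  have hout := pv_outer usuarios [] (by simpa using hpre)
    (PySem.Dict.empty : PySem.Dict String (List String)) (by rfl) (by intro r; rfl)
  obtain ⟨hk, hg⟩ := hout
  simp only [List.nil_append] at hk hg
  have hnodk : (usuarios.foldl
      (fun d p => p.2.foldl (pvStep p.1) d)
      (PySem.Dict.empty : PySem.Dict String (List String))).keys.Nodup := by
    rw [hk]; exact PySem.List.nodup_dedup _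
  have hA : quienes_ejercitan usuarios
      = (usuarios.foldl (fun d p => p.2.foldl (pvStep p.1) d)
          (PySem.Dict.empty : PySem.Dict String (List String))).items := rfl
  rw [hA, PySem.Dict.items_eq_map_keys _ hnodk ([] : List String), hk]
  unfold quienes_ejercitan_alt
  exact List.map_congr_left (fun k _ => by rw [hg k])
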